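-- pv_equiv track=rewrite | github.com/jorgef21/Python | last_word_len.py | last_word_len
-- ===== SOURCE A (Python) =====
-- def last_word_len(s):
--   words = []
--   words.append(s.split())
--   last_word_length = 0
--   w1 = ''
--
--   for word in words[0]:
--       if len(word)>1:
--           last_word_length = len(word)
--           w1 = word
--   return w1, last_word_length
-- ===== SOURCE B (Python) =====
-- def last_word_len(s):
--     for word in reversed(s.split()):
--         if len(word) > 1:
--             return word, len(word)
--     return '', 0
-- ===== Notes on version B (the rewrite author's own statement) =====
-- stated objective: idiomatic
-- what changed: Replaces the forward scan that remembers the last qualifying word with a reverse iteration that short-circuits at the first word longer than 1 character.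
import Mathlib
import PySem

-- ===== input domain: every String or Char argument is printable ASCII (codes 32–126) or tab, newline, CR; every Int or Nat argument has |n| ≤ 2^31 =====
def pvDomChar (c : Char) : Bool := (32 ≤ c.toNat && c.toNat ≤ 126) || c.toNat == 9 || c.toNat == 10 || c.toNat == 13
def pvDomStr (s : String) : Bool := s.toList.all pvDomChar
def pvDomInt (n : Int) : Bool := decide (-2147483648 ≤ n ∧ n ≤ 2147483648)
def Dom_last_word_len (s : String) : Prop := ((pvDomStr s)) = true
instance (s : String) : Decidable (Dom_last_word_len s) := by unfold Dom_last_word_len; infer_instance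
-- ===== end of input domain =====

-- ===== PORT A =====
-- B replaces A's forward scan remembering the last long word with a reverse short-circuiting search (idiomatic).
def last_word_len (s : String) : String × Int :=
  let words := PySem.Str.split₀ s
  let r := words.foldl
    (fun (acc : String × Int) word =>
      if PySem.Str.len word > 1 then (word, PySem.Str.len word) else acc)
    ("", 0)
  (r.1, r.2)

-- ===== PORT B =====
def lwlFindRev : List String → String × Int
  | [] => ("", 0)
  | w :: ws => if PySem.Str.len w > 1 then (w, PySem.Str.len w) else lwlFindRev ws

def last_word_len_alt (s : String) : String × Int :=
  lwlFindRev (PySem.Str.split₀ s).reverse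

-- ===== PRECONDITION & SPEC =====
def Spec_last_word_len (s : String) (out : String × Int) : Prop := out = last_word_len_alt s
instance (s : String) (out : String × Int) : Decidable (Spec_last_word_len s out) := by unfold Spec_last_word_len; infer_instance

-- ===== CLAIM (what is proved, stated in full; the proofs are below) =====
def Claim_equal_last_word_len : Prop := ∀ (s : String), Dom_last_word_len s → Spec_last_word_len s (last_word_len s)

-- ===== LEMMAS AND PROOFS =====
def lwlGo (l : List String) (acc : String × Int) : String × Int :=
  match l with
  | [] => acc
  | w :: ws => if PySem.Str.len w > 1 then (w, PySem.Str.len w) else lwlGo ws acc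

theorem lwlGo_append (l : List String) (w : String) (acc : String × Int) :
    lwlGo (l ++ [w]) acc =
      lwlGo l (if PySem.Str.len w > 1 then (w, PySem.Str.len w) else acc) := by
  induction l with
  | nil => rfl
  | cons u us ih => simp only [List.cons_append, lwlGo, ih]

theorem lwl_foldl_eq (l : List String) (acc : String × Int) :
    l.foldl (fun (a : String × Int) word =>
        if PySem.Str.len word > 1 then (word, PySem.Str.len word) else a) acc
      = lwlGo l.reverse acc := by
  induction l generalizing acc with
  | nil => rfl
  | cons w ws ih =>
    rw [List.foldl_cons, ih, List.reverse_cons, lwlGo_append]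

theorem lwlGo_eq_findRev (l : List String) : lwlGo l ("", 0) = lwlFindRev l := by
  induction l with
  | nil => rfl
  | cons w ws ih => simp only [lwlGo, lwlFindRev, ih]

-- ===== VERDICT (by name: the statement is the Claim_ definition above) =====
theorem last_word_len_spec : Claim_equal_last_word_len := by
  intro s _
  unfold Spec_last_word_len last_word_len last_word_len_alt
  simp only [lwl_foldl_eq, lwlGo_eq_findRev]
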